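-- pv_equiv track=rewrite | github.com/yuyuliu11037/HypPlan | src/oracle_nqueens.py | render_prefix_steps
-- ===== SOURCE A (Python) =====
-- def _conflicts(placed: list[tuple[int, int]], r: int, c: int) -> bool:
--     """True if a queen at (r,c) attacks any queen in `placed` (1-indexed)."""
--     for (rp, cp) in placed:
--         if cp == c:
--             return True
--         if abs(rp - r) == abs(cp - c):
--             return True
--     return False
--
-- def available_columns(N: int, placed: list[tuple[int, int]],
--                       next_row: int) -> list[int]:
--     """Return sorted list of 1-indexed columns where a queen can be safely
--     placed at row `next_row` given prior `placed` queens."""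
--     return [c for c in range(1, N + 1)
--             if not _conflicts(placed, next_row, c)]
--
-- def render_prefix_steps(N: int, prefix_cols: list[int]) -> str:
--     """Render step lines for an already-placed prefix (no Solution: line).
--
--     Returns trailing-newline-free text. Used to build prompts where the
--     model continues from row len(prefix_cols)+1.
--     """
--     lines: list[str] = []
--     placed: list[tuple[int, int]] = []
--     for r, c in enumerate(prefix_cols, 1):
--         placed.append((r, c))
--         lines.append(f"Step {r}: Place queen in row {r} at column {c}.")
--         placed_str = ",".join(f"({rr},{cc})" for rr, cc in placed)
--         lines.append(f"  Placed: [{placed_str}]")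
--         if r < N:
--             avail = available_columns(N, placed, r + 1)
--             avail_str = ", ".join(str(x) for x in avail)
--             lines.append(f"  Available for row {r+1}: [{avail_str}]")
--     return "\n".join(lines)
-- ===== SOURCE B (Python) =====
-- def render_prefix_steps(N: int, prefix_cols: list[int]) -> str:
--     """O(k*N): track occupied columns and both diagonal sets for O(1)
--     conflict checks, and extend the placed-string incrementally."""
--     lines = []
--     cols = set()
--     diag_down = set()  # c - r for each placed queen
--     diag_up = set()    # c + r for each placed queen
--     placed_str = ""
--     for r, c in enumerate(prefix_cols, 1):
--         cols.add(c)
--         diag_down.add(c - r)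
--         diag_up.add(c + r)
--         placed_str += ("," if r > 1 else "") + f"({r},{c})"
--         lines.append(f"Step {r}: Place queen in row {r} at column {c}.")
--         lines.append(f"  Placed: [{placed_str}]")
--         if r < N:
--             nr = r + 1
--             avail = [x for x in range(1, N + 1)
--                      if x not in cols and x - nr not in diag_down and x + nr not in diag_up]
--             lines.append(f"  Available for row {nr}: [{', '.join(map(str, avail))}]")
--     return "\n".join(lines)
-- ===== Notes on version B (the rewrite author's own statement) =====
-- stated objective: faster
-- what changed: Replaces the per-column rescan of all placed queens (and the per-step re-join of the placed list) with incrementally maintained sets of occupied columns and both diagonals for O(1) conflict checks plus an incrementally extended placed string.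
import Mathlib
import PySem

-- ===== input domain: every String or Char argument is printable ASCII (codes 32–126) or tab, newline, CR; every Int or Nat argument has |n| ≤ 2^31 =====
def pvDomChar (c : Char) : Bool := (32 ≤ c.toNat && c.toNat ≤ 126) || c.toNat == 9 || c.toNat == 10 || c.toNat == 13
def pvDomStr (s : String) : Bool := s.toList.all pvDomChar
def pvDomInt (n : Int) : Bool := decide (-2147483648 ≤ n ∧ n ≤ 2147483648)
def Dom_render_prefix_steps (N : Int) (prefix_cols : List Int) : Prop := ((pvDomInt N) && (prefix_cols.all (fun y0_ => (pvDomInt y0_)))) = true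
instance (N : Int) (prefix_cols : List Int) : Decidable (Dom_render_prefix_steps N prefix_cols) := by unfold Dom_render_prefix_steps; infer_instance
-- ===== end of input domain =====

-- B replaces A's per-column rescan of all placed queens (and per-step re-join of the placed
-- list) by incrementally maintained column/diagonal sets and an incrementally grown string
-- (objective: faster, O(k*N) instead of O(k^2*N)).

-- ===== PORT A =====

-- A's `_conflicts`: scan `placed`, early return on first attacking queen.
def pvConflicts : List (Int × Int) → Int → Int → Bool
  | [], _, _ => false
  | (rp, cp) :: rest, r, c =>
    if cp = c then true
    else if (rp - r).natAbs = (cp - c).natAbs then true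
    else pvConflicts rest r c

-- A's `available_columns`: list comprehension over range(1, N+1).
def pvAvailableColumns (N : Int) (placed : List (Int × Int)) (next_row : Int) : List Int :=
  (PySem.List.pyRange 1 (N + 1) 1).filter (fun c => ! pvConflicts placed next_row c)

-- f"({rr},{cc})"
def pvFmtPair (p : Int × Int) : String :=
  "(" ++ PySem.Int.toStr p.1 ++ "," ++ PySem.Int.toStr p.2 ++ ")"

-- one iteration of A's `for r, c in enumerate(prefix_cols, 1)` loop; state = (lines, placed)
def pvStepA (N : Int) (st : List String × List (Int × Int)) (rc : Int × Int) :
    List String × List (Int × Int) :=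
  let placed := st.2 ++ [rc]
  let lines := st.1 ++ ["Step " ++ PySem.Int.toStr rc.1 ++ ": Place queen in row " ++
      PySem.Int.toStr rc.1 ++ " at column " ++ PySem.Int.toStr rc.2 ++ "."]
  let placed_str := PySem.Str.join "," (placed.map pvFmtPair)
  let lines := lines ++ ["  Placed: [" ++ placed_str ++ "]"]
  let lines := if rc.1 < N then
      let avail := pvAvailableColumns N placed (rc.1 + 1)
      let avail_str := PySem.Str.join ", " (avail.map PySem.Int.toStr)
      lines ++ ["  Available for row " ++ PySem.Int.toStr (rc.1 + 1) ++ ": [" ++ avail_str ++ "]"]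
    else lines
  (lines, placed)

def render_prefix_steps (N : Int) (prefix_cols : List Int) : String :=
  PySem.Str.join "\n" ((PySem.List.enumerate prefix_cols 1).foldl (pvStepA N) ([], [])).1

-- ===== PORT B =====

-- one iteration of B's loop; state = (lines, cols, diag_down, diag_up, placed_str)
def pvStepB (N : Int)
    (st : List String × PySem.Set Int × PySem.Set Int × PySem.Set Int × String)
    (rc : Int × Int) :
    List String × PySem.Set Int × PySem.Set Int × PySem.Set Int × String :=
  let r := rc.1
  let c := rc.2
  let cols := PySem.Set.add st.2.1 c
  let diag_down := PySem.Set.add st.2.2.1 (c - r)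
  let diag_up := PySem.Set.add st.2.2.2.1 (c + r)
  let placed_str := st.2.2.2.2 ++ (if 1 < r then "," else "") ++
      ("(" ++ PySem.Int.toStr r ++ "," ++ PySem.Int.toStr c ++ ")")
  let lines := st.1 ++ ["Step " ++ PySem.Int.toStr r ++ ": Place queen in row " ++
      PySem.Int.toStr r ++ " at column " ++ PySem.Int.toStr c ++ "."]
  let lines := lines ++ ["  Placed: [" ++ placed_str ++ "]"]
  let lines := if r < N then
      let nr := r + 1
      let avail := (PySem.List.pyRange 1 (N + 1) 1).filter (fun x =>
        ! PySem.Set.contains cols x && ! PySem.Set.contains diag_down (x - nr) &&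
        ! PySem.Set.contains diag_up (x + nr))
      lines ++ ["  Available for row " ++ PySem.Int.toStr nr ++ ": [" ++
        PySem.Str.join ", " (avail.map PySem.Int.toStr) ++ "]"]
    else lines
  (lines, cols, diag_down, diag_up, placed_str)

def render_prefix_steps_alt (N : Int) (prefix_cols : List Int) : String :=
  PySem.Str.join "\n"
    ((PySem.List.enumerate prefix_cols 1).foldl (pvStepB N)
      ([], PySem.Set.empty, PySem.Set.empty, PySem.Set.empty, "")).1

-- ===== PRECONDITION & SPEC =====
def Spec_render_prefix_steps (N : Int) (prefix_cols : List Int) (out : String) : Prop := out = render_prefix_steps_alt N prefix_cols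
instance (N : Int) (prefix_cols : List Int) (out : String) : Decidable (Spec_render_prefix_steps N prefix_cols out) := by unfold Spec_render_prefix_steps; infer_instance

-- ===== CLAIM (what is proved, stated in full; the proofs are below) =====
def Claim_equal_render_prefix_steps : Prop := ∀ (N : Int) (prefix_cols : List Int), Dom_render_prefix_steps N prefix_cols → Spec_render_prefix_steps N prefix_cols (render_prefix_steps N prefix_cols)

-- ===== LEMMAS AND PROOFS =====

-- characterisation of A's early-return scan as an existential
lemma pvConflicts_eq_true_iff (placed : List (Int × Int)) (r c : Int) :
    pvConflicts placed r c = true ↔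
      ∃ p ∈ placed, p.2 = c ∨ (p.1 - r).natAbs = (p.2 - c).natAbs := by
  induction placed with
  | nil => simp [pvConflicts]
  | cons q rest ih =>
    obtain ⟨rp, cp⟩ := q
    simp only [pvConflicts, List.mem_cons]
    split_ifs with h1 h2
    · simp; tauto
    · simp; tauto
    · simp only [ih]
      constructor
      · rintro ⟨p, hp, hc⟩; exact ⟨p, Or.inr hp, hc⟩
      · rintro ⟨p, hp | hp, hc⟩
        · subst hp; simp at hc; tauto
        · exact ⟨p, hp, hc⟩

-- A's conflict test equals B's three set-membership tests, given the set invariants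
lemma pvConflict_sets (placed : List (Int × Int)) (cols d1 d2 : PySem.Set Int)
    (hc : ∀ x, x ∈ cols ↔ ∃ p ∈ placed, p.2 = x)
    (hd1 : ∀ x, x ∈ d1 ↔ ∃ p ∈ placed, p.2 - p.1 = x)
    (hd2 : ∀ x, x ∈ d2 ↔ ∃ p ∈ placed, p.2 + p.1 = x)
    (nr x : Int) :
    pvConflicts placed nr x =
      (PySem.Set.contains cols x || PySem.Set.contains d1 (x - nr) ||
        PySem.Set.contains d2 (x + nr)) := by
  rw [Bool.eq_iff_iff]
  simp only [pvConflicts_eq_true_iff, Bool.or_eq_true, PySem.Set.contains_iff,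
    hc, hd1, hd2]
  constructor
  · rintro ⟨p, hp, h | h⟩
    · exact Or.inl (Or.inl ⟨p, hp, h⟩)
    · rcases Int.natAbs_eq_natAbs_iff.mp h with h' | h'
      · exact Or.inl (Or.inr ⟨p, hp, by omega⟩)
      · exact Or.inr ⟨p, hp, by omega⟩
  · rintro ((⟨p, hp, h⟩ | ⟨p, hp, h⟩) | ⟨p, hp, h⟩)
    · exact ⟨p, hp, Or.inl h⟩
    · exact ⟨p, hp, Or.inr (by omega)⟩
    · exact ⟨p, hp, Or.inr (by omega)⟩

-- ",".join(xs + [y]) grows by one separator (empty when xs is empty)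
lemma pvJoin_snoc (sep : String) (xs : List String) (y : String) :
    PySem.Str.join sep (xs ++ [y]) =
      PySem.Str.join sep xs ++ (if xs.isEmpty then "" else sep) ++ y := by
  apply String.toList_injective
  simp only [String.toList_append, PySem.Str.toList_join, List.map_append, List.map_cons,
    List.map_nil]
  induction xs with
  | nil =>
    simp only [List.map_nil, List.nil_append, PySem.Chars.join_nil,
      PySem.Chars.join_singleton, List.isEmpty_nil, if_pos]
    rfl
  | cons a xs ih =>
    cases xs with
    | nil =>
      simp only [List.map_cons, List.map_nil, List.cons_append, List.nil_append,
        PySem.Chars.join_cons_cons, PySem.Chars.join_singleton, List.isEmpty_cons,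
        if_neg Bool.false_ne_true, List.append_assoc]
    | cons b xs =>
      simp only [List.map_cons, List.cons_append, PySem.Chars.join_cons_cons,
        List.isEmpty_cons, if_neg Bool.false_ne_true] at *
      simp [ih, List.append_assoc]

-- the two loop bodies keep equal line lists, given the invariants on B's state
lemma pvLoop_eq (N : Int) : ∀ (cs : List Int) (r : Int) (lines : List String)
    (placed : List (Int × Int)) (cols d1 d2 : PySem.Set Int) (ps : String),
    1 ≤ r →
    (placed = [] ↔ r = 1) →
    (∀ x, x ∈ cols ↔ ∃ p ∈ placed, p.2 = x) →
    (∀ x, x ∈ d1 ↔ ∃ p ∈ placed, p.2 - p.1 = x) →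
    (∀ x, x ∈ d2 ↔ ∃ p ∈ placed, p.2 + p.1 = x) →
    ps = PySem.Str.join "," (placed.map pvFmtPair) →
    ((PySem.List.enumerate cs r).foldl (pvStepA N) (lines, placed)).1
      = ((PySem.List.enumerate cs r).foldl (pvStepB N) (lines, cols, d1, d2, ps)).1 := by
  intro cs
  induction cs with
  | nil => intros; simp [PySem.List.enumerate_nil]
  | cons c cs ih =>
    intro r lines placed cols d1 d2 ps hr hemp hc hd1 hd2 hps
    rw [PySem.List.enumerate_cons, List.foldl_cons, List.foldl_cons]
    -- the new placed string is equal on both sides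
    have hps' : ps ++ (if 1 < r then "," else "") ++
        ("(" ++ PySem.Int.toStr r ++ "," ++ PySem.Int.toStr c ++ ")")
        = PySem.Str.join "," ((placed ++ [(r, c)]).map pvFmtPair) := by
      rw [List.map_append, List.map_singleton, pvJoin_snoc]
      have : (placed.map pvFmtPair).isEmpty = !decide (1 < r) := by
        by_cases h : 1 < r
        · simp only [h, decide_true, Bool.not_true, List.isEmpty_eq_false_iff,
            ne_eq, List.map_eq_nil_iff]
          intro he; exact absurd (hemp.mp he) (by omega)
        · have hr1 : r = 1 := by omega
          simp [List.isEmpty_iff, hemp, hr1]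
      rw [this, hps, pvFmtPair]
      rcases Decidable.em (1 < r) with h | h <;> simp [h]
    -- the conflict predicates agree pointwise for the extended state
    have hcols' : ∀ x, x ∈ PySem.Set.add cols c ↔ ∃ p ∈ placed ++ [(r, c)], p.2 = x := by
      intro x
      simp only [PySem.Set.mem_add, hc, List.mem_append, List.mem_singleton]
      constructor
      · rintro (⟨p, hp, h⟩ | h)
        · exact ⟨p, Or.inl hp, h⟩
        · exact ⟨(r, c), Or.inr rfl, h.symm⟩
      · rintro ⟨p, hp | hp, h⟩
        · exact Or.inl ⟨p, hp, h⟩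
        · subst hp; exact Or.inr h.symm
    have hd1' : ∀ x, x ∈ PySem.Set.add d1 (c - r) ↔
        ∃ p ∈ placed ++ [(r, c)], p.2 - p.1 = x := by
      intro x
      simp only [PySem.Set.mem_add, hd1, List.mem_append, List.mem_singleton]
      constructor
      · rintro (⟨p, hp, h⟩ | h)
        · exact ⟨p, Or.inl hp, h⟩
        · exact ⟨(r, c), Or.inr rfl, h.symm⟩
      · rintro ⟨p, hp | hp, h⟩
        · exact Or.inl ⟨p, hp, h⟩
        · subst hp; exact Or.inr h.symm
    have hd2' : ∀ x, x ∈ PySem.Set.add d2 (c + r) ↔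
        ∃ p ∈ placed ++ [(r, c)], p.2 + p.1 = x := by
      intro x
      simp only [PySem.Set.mem_add, hd2, List.mem_append, List.mem_singleton]
      constructor
      · rintro (⟨p, hp, h⟩ | h)
        · exact ⟨p, Or.inl hp, h⟩
        · exact ⟨(r, c), Or.inr rfl, h.symm⟩
      · rintro ⟨p, hp | hp, h⟩
        · exact Or.inl ⟨p, hp, h⟩
        · subst hp; exact Or.inr h.symm
    have havail : pvAvailableColumns N (placed ++ [(r, c)]) (r + 1)
        = (PySem.List.pyRange 1 (N + 1) 1).filter (fun x =>
            ! PySem.Set.contains (PySem.Set.add cols c) x &&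
            ! PySem.Set.contains (PySem.Set.add d1 (c - r)) (x - (r + 1)) &&
            ! PySem.Set.contains (PySem.Set.add d2 (c + r)) (x + (r + 1))) := by
      unfold pvAvailableColumns
      apply List.filter_congr
      intro x _
      rw [pvConflict_sets (placed ++ [(r, c)]) _ _ _ hcols' hd1' hd2' (r + 1) x]
      cases PySem.Set.contains (PySem.Set.add cols c) x <;>
        cases PySem.Set.contains (PySem.Set.add d1 (c - r)) (x - (r + 1)) <;>
        cases PySem.Set.contains (PySem.Set.add d2 (c + r)) (x + (r + 1)) <;> rfl
    -- one step of B equals one step of A on the line list, carrying B's updated state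
    have hstate : pvStepB N (lines, cols, d1, d2, ps) (r, c)
        = ((pvStepA N (lines, placed) (r, c)).1, PySem.Set.add cols c,
            PySem.Set.add d1 (c - r), PySem.Set.add d2 (c + r),
            ps ++ (if 1 < r then "," else "") ++
              ("(" ++ PySem.Int.toStr r ++ "," ++ PySem.Int.toStr c ++ ")")) := by
      simp only [pvStepA, pvStepB, havail, hps']
    rw [hstate]
    exact ih (r + 1) _ (placed ++ [(r, c)]) _ _ _ _ (by omega)
      (by simp; omega) hcols' hd1' hd2' hps'

-- ===== VERDICT (by name: the statement is the Claim_ definition above) =====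
theorem render_prefix_steps_spec : Claim_equal_render_prefix_steps := by
  intro N prefix_cols _
  show render_prefix_steps N prefix_cols = render_prefix_steps_alt N prefix_cols
  unfold render_prefix_steps render_prefix_steps_alt
  congr 1
  exact pvLoop_eq N prefix_cols 1 [] [] PySem.Set.empty PySem.Set.empty PySem.Set.empty ""
    le_rfl (by simp) (by simp [PySem.Set.empty]) (by simp [PySem.Set.empty])
    (by simp [PySem.Set.empty]) (by simp; rfl)
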